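-- pv_equiv track=rewrite | github.com/belsarmi/AdventOfCode2019 | Day4/python/AoC_Day4Solution2.py | check_for_double_not_matching
-- ===== SOURCE A (Python) =====
-- def check_for_double_not_matching(_in):
--     group = {}
--     double_not_matching = False
--     counter = 0
--     actual_char = ''
--     for i in range(len(_in)-1):
--         char = _in[i]
--         if char == _in[i+1]:
--             if char not in group:
--                 group[char] = 0
--             group[char] += 1
--         counter = 0
--     for key, val in group.items():
--         if val == 1:
--             double_not_matching = True
--     return double_not_matching
-- ===== SOURCE B (Python) =====
-- def check_for_double_not_matching(_in):
--     # Run-length encode the string, then aggregate pairs-per-character across runs.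
--     runs = []
--     for ch in _in:
--         if runs and runs[-1][0] == ch:
--             runs[-1][1] += 1
--         else:
--             runs.append([ch, 1])
--     counts = {}
--     for ch, length in runs:
--         counts[ch] = counts.get(ch, 0) + length - 1
--     return 1 in counts.values()
-- ===== Notes on version B (the rewrite author's own statement) =====
-- stated objective: alternative
-- what changed: A scans index pairs and bumps a per-char dict for every adjacent equal pair, then scans the dict for a value of 1; B run-length encodes the string, aggregates (run length - 1) per character across runs, and tests whether 1 is among the totals.
import Mathlib
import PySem

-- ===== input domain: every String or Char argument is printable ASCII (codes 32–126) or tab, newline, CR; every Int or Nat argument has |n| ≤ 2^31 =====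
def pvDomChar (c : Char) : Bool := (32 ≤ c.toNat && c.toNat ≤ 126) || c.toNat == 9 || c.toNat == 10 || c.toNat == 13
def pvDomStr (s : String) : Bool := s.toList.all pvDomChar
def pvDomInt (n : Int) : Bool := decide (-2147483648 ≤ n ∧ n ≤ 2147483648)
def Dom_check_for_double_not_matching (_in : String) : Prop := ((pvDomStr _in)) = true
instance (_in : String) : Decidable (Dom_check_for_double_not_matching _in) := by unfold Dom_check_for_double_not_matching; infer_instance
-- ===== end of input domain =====

-- B replaces A's adjacent-pair index loop + per-dict flag loop by a run-length
-- encoding pass, per-character aggregation of (run length - 1), and a membership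
-- test (objective: alternative, same asymptotic cost).

-- ===== PORT A =====
-- 'group[char] += 1' (its key is guaranteed present by the preceding
-- 'if char not in group') is ported as Dict.modify with default 0, exact there.
def check_for_double_not_matching (_in : String) : Bool :=
  let group := (PySem.List.pyRange 0 (PySem.Str.len _in - 1) 1).foldl
    (fun (g : PySem.Dict Char Int) i =>
      match PySem.Str.pyGet? _in i, PySem.Str.pyGet? _in (i + 1) with
      | some char, some nxt =>
          if char = nxt then
            (if g.contains char = false then g.insert char 0 else g).modify char 0 (· + 1)
          else g
      | _, _ => g)
    PySem.Dict.empty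
  group.items.foldl (fun b kv => if kv.2 = 1 then true else b) false

-- ===== PORT B =====
def check_for_double_not_matching_alt (_in : String) : Bool :=
  let runs := _in.toList.foldl
    (fun (rs : List (Char × Int)) ch =>
      match rs.getLast? with
      | some (c, l) => if c = ch then rs.dropLast ++ [(c, l + 1)] else rs ++ [(ch, 1)]
      | none => rs ++ [(ch, 1)])
    []
  let counts := runs.foldl
    (fun (d : PySem.Dict Char Int) p => d.insert p.1 (d.getD p.1 0 + p.2 - 1))
    PySem.Dict.empty
  counts.values.contains 1

-- ===== PRECONDITION & SPEC =====
def Spec_check_for_double_not_matching (_in : String) (out : Bool) : Prop := out = check_for_double_not_matching_alt _in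
instance (_in : String) (out : Bool) : Decidable (Spec_check_for_double_not_matching _in out) := by unfold Spec_check_for_double_not_matching; infer_instance

-- ===== CLAIM (what is proved, stated in full; the proofs are below) =====
def Claim_equal_check_for_double_not_matching : Prop := ∀ (_in : String), Dom_check_for_double_not_matching _in → Spec_check_for_double_not_matching _in (check_for_double_not_matching _in)

-- ===== LEMMAS AND PROOFS =====

def pairChars : List Char → List Char
  | [] => []
  | [_] => []
  | a :: b :: r => (if a = b then [a] else []) ++ pairChars (b :: r)

def rle (cs : List Char) : List (Char × Int) :=
  cs.foldl
    (fun (rs : List (Char × Int)) ch =>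
      match rs.getLast? with
      | some (c, l) => if c = ch then rs.dropLast ++ [(c, l + 1)] else rs ++ [(ch, 1)]
      | none => rs ++ [(ch, 1)])
    []

lemma pairChars_subset {c : Char} {cs : List Char} (h : c ∈ pairChars cs) : c ∈ cs := by
  induction cs with
  | nil => simp [pairChars] at h
  | cons a t ih =>
      cases t with
      | nil => simp [pairChars] at h
      | cons b r =>
          simp only [pairChars, List.mem_append] at h
          rcases h with h | h
          · split at h <;> simp_all
          · exact List.mem_cons_of_mem a (ih h)

lemma pairChars_append (cs : List Char) (x : Char) :
    pairChars (cs ++ [x]) = pairChars cs ++ (if cs.getLast? = some x then [x] else []) := by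
  induction cs with
  | nil => simp [pairChars]
  | cons a t ih =>
      cases t with
      | nil => by_cases h : a = x <;> simp [pairChars, h]
      | cons b r =>
          simp only [List.cons_append] at ih
          simp only [List.cons_append, pairChars, List.getLast?_cons_cons, ih]
          simp [List.append_assoc]

lemma rle_append (cs : List Char) (x : Char) :
    rle (cs ++ [x]) = match (rle cs).getLast? with
      | some (c, l) => if c = x then (rle cs).dropLast ++ [(c, l + 1)] else rle cs ++ [(x, 1)]
      | none => rle cs ++ [(x, 1)] := by
  simp [rle, List.foldl_append]

lemma rle_last (cs : List Char) : ((rle cs).getLast?).map Prod.fst = cs.getLast? := by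
  induction cs using List.reverseRecOn with
  | nil => simp [rle]
  | append_singleton cs x ih =>
      rw [rle_append]
      cases h : (rle cs).getLast? with
      | none => simp
      | some p =>
          obtain ⟨c, l⟩ := p
          by_cases hc : c = x <;> simp [hc]


lemma rle_append_none {cs : List Char} {x : Char} (h : (rle cs).getLast? = none) :
    rle (cs ++ [x]) = rle cs ++ [(x, 1)] := by
  rw [rle_append, h]

lemma rle_append_some {cs : List Char} {x c0 : Char} {l : Int}
    (h : (rle cs).getLast? = some (c0, l)) :
    rle (cs ++ [x]) = if c0 = x then (rle cs).dropLast ++ [(c0, l + 1)] else rle cs ++ [(x, 1)] := by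
  rw [rle_append, h]

lemma rle_nil_iff (cs : List Char) : rle cs = [] ↔ cs = [] := by
  constructor
  · intro h
    have h2 := rle_last cs
    rw [h] at h2
    simp only [List.getLast?_nil, Option.map_none] at h2
    exact List.getLast?_eq_none_iff.mp h2.symm
  · intro h; subst h; rfl

lemma mem_rle_fst (cs : List Char) : ∀ c : Char, c ∈ (rle cs).map Prod.fst ↔ c ∈ cs := by
  induction cs using List.reverseRecOn with
  | nil => intro c; simp [rle]
  | append_singleton cs x ih =>
      intro c
      cases h : (rle cs).getLast? with
      | none =>
          have hnil : rle cs = [] := List.getLast?_eq_none_iff.mp h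
          rw [rle_append_none h, hnil]
          have hcs : cs = [] := (rle_nil_iff cs).mp hnil
          subst hcs
          simp
      | some p =>
          obtain ⟨c0, l⟩ := p
          rw [rle_append_some h]
          have hlast : (rle cs).dropLast ++ [(c0, l)] = rle cs :=
            List.dropLast_append_getLast? _ h
          have hx : c0 ∈ cs := (ih c0).mp (by rw [← hlast]; simp)
          by_cases hc : c0 = x
          · subst hc
            rw [if_pos rfl]
            have key : ((rle cs).dropLast ++ [(c0, l + 1)]).map Prod.fst
                = ((rle cs).dropLast ++ [(c0, l)]).map Prod.fst := by
              simp
            rw [List.mem_append, ← ih c, key, hlast]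
            constructor
            · exact Or.inl
            · rintro (hm | hm)
              · exact hm
              · simp at hm; subst hm; exact (ih c).mpr hx
          · rw [if_neg hc]
            simp [ih c]

lemma rle_count (cs : List Char) (c : Char) :
    (((rle cs).filter (fun p => p.1 = c)).map (fun p => p.2 - 1)).sum
      = ((pairChars cs).count c : Int) := by
  induction cs using List.reverseRecOn with
  | nil => simp [rle, pairChars]
  | append_singleton cs x ih =>
      have hcount : ((pairChars (cs ++ [x])).count c : Int)
          = ((pairChars cs).count c : Int)
            + (if cs.getLast? = some x then (if x = c then 1 else 0) else 0) := by
        rw [pairChars_append]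
        by_cases h1 : cs.getLast? = some x
        · by_cases h2 : x = c <;> simp [h1, h2, List.count_append]
        · simp [h1]
      rw [hcount]
      cases h : (rle cs).getLast? with
      | none =>
          have hnil : rle cs = [] := List.getLast?_eq_none_iff.mp h
          have hcs : cs = [] := (rle_nil_iff cs).mp hnil
          subst hcs
          rw [rle_append_none h, hnil]
          by_cases hc : x = c <;> simp [hc]
      | some p =>
          obtain ⟨c0, l⟩ := p
          have hlast : (rle cs).dropLast ++ [(c0, l)] = rle cs :=
            List.dropLast_append_getLast? _ h
          have hcl : cs.getLast? = some c0 := by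
            have := rle_last cs
            rw [h] at this
            exact this.symm
          rw [rle_append_some h]
          by_cases hc : c0 = x
          · subst hc
            rw [if_pos rfl]
            rw [← hlast] at ih
            simp only [List.filter_append, List.map_append, List.sum_append] at ih ⊢
            rw [hcl, if_pos rfl]
            by_cases hxc : c0 = c
            · simp [hxc] at ih ⊢
              omega
            · simp [hxc] at ih ⊢
              exact ih
          · rw [if_neg hc]
            rw [List.filter_append, List.map_append, List.sum_append, ih]
            have : cs.getLast? ≠ some x := by rw [hcl]; simp [hc]
            rw [if_neg this]
            by_cases hxc : x = c <;> simp [hxc]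

def auxA : List Char → PySem.Dict Char Int → PySem.Dict Char Int
  | [], g => g
  | [_], g => g
  | a :: b :: r, g =>
      auxA (b :: r)
        (if a = b then
          (if g.contains a = false then g.insert a 0 else g).modify a 0 (· + 1)
        else g)

def stepF (cs : List Char) (g : PySem.Dict Char Int) (i : Int) : PySem.Dict Char Int :=
  match PySem.List.pyGet? cs i, PySem.List.pyGet? cs (i + 1) with
  | some char, some nxt =>
      if char = nxt then
        (if g.contains char = false then g.insert char 0 else g).modify char 0 (· + 1)
      else g
  | _, _ => g

lemma stepA_getD (g : PySem.Dict Char Int) (a c : Char) :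
    ((if g.contains a = false then g.insert a 0 else g).modify a 0 (· + 1)).getD c 0
      = g.getD c 0 + (if a = c then 1 else 0) := by
  by_cases h : g.contains a = false
  · rw [if_pos h, PySem.Dict.getD_modify]
    by_cases hc : c = a
    · subst hc
      rw [if_pos rfl, PySem.Dict.getD_insert, if_pos rfl,
        PySem.Dict.getD_of_not_contains g 0 h]
      simp
    · rw [if_neg hc, PySem.Dict.getD_insert, if_neg hc,
        if_neg (fun hh : a = c => hc hh.symm)]
      simp
  · rw [if_neg h, PySem.Dict.getD_modify]
    by_cases hc : c = a
    · subst hc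
      rw [if_pos rfl, if_pos rfl]
    · rw [if_neg hc, if_neg (fun hh : a = c => hc hh.symm)]
      simp

lemma stepA_mem_keys (g : PySem.Dict Char Int) (a c : Char) :
    c ∈ ((if g.contains a = false then g.insert a 0 else g).modify a 0 (· + 1)).keys
      ↔ c = a ∨ c ∈ g.keys := by
  by_cases h : g.contains a = false
  · rw [if_pos h, PySem.Dict.keys_modify, PySem.Dict.mem_keys_insert, PySem.Dict.mem_keys_insert]
    tauto
  · rw [if_neg h, PySem.Dict.keys_modify, PySem.Dict.mem_keys_insert]

lemma stepA_nodup (g : PySem.Dict Char Int) (a : Char) (hg : g.keys.Nodup) :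
    ((if g.contains a = false then g.insert a 0 else g).modify a 0 (· + 1)).keys.Nodup := by
  rw [PySem.Dict.keys_modify]
  apply PySem.Dict.nodup_keys_insert
  by_cases h : g.contains a = false
  · rw [if_pos h]; exact PySem.Dict.nodup_keys_insert _ _ _ hg
  · rw [if_neg h]; exact hg

lemma auxA_getD (cs : List Char) : ∀ (g : PySem.Dict Char Int) (c : Char),
    (auxA cs g).getD c 0 = g.getD c 0 + ((pairChars cs).count c : Int) := by
  induction cs with
  | nil => intro g c; simp [auxA, pairChars]
  | cons a t ih =>
      intro g c
      cases t with
      | nil => simp [auxA, pairChars]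
      | cons b r =>
          show (auxA (b :: r) _).getD c 0 = _
          by_cases hab : a = b
          · rw [if_pos hab, ih, stepA_getD]
            by_cases hac : a = c <;>
              simp [pairChars, hab, List.count_cons] <;> omega
          · rw [if_neg hab, ih]
            simp [pairChars, hab]

lemma auxA_mem_keys (cs : List Char) : ∀ (g : PySem.Dict Char Int) (c : Char),
    c ∈ (auxA cs g).keys ↔ c ∈ pairChars cs ∨ c ∈ g.keys := by
  induction cs with
  | nil => intro g c; simp [auxA, pairChars]
  | cons a t ih =>
      intro g c
      cases t with
      | nil => simp [auxA, pairChars]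
      | cons b r =>
          show c ∈ (auxA (b :: r) _).keys ↔ _
          by_cases hab : a = b
          · rw [if_pos hab, ih, stepA_mem_keys]
            subst hab
            simp [pairChars]
            tauto
          · rw [if_neg hab, ih]
            simp [pairChars, hab]

lemma auxA_nodup (cs : List Char) : ∀ (g : PySem.Dict Char Int), g.keys.Nodup →
    (auxA cs g).keys.Nodup := by
  induction cs with
  | nil => intro g hg; exact hg
  | cons a t ih =>
      intro g hg
      cases t with
      | nil => exact hg
      | cons b r =>
          show (auxA (b :: r) _).keys.Nodup
          by_cases hab : a = b
          · rw [if_pos hab]; exact ih _ (stepA_nodup g a hg)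
          · rw [if_neg hab]; exact ih _ hg

lemma stepF_shift (x : Char) (cs : List Char) (g : PySem.Dict Char Int) (k : Nat) :
    stepF (x :: cs) g (1 + (k : Int)) = stepF cs g ((0 : Int) + k) := by
  have h1 : PySem.List.pyGet? (x :: cs) (1 + (k : Int)) = cs[k]? := by
    rw [show (1 : Int) + k = (k : Int) + 1 by ring, PySem.List.pyGet?_cons_succ,
      PySem.List.pyGet?_natCast]
  have h2 : PySem.List.pyGet? (x :: cs) (1 + (k : Int) + 1) = cs[k + 1]? := by
    rw [show (1 : Int) + k + 1 = ((k + 1 : Nat) : Int) + 1 by push_cast; ring,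
      PySem.List.pyGet?_cons_succ, PySem.List.pyGet?_natCast]
  have h3 : PySem.List.pyGet? cs ((0 : Int) + k) = cs[k]? := by
    rw [show (0 : Int) + k = ((k : Nat) : Int) by ring, PySem.List.pyGet?_natCast]
  have h4 : PySem.List.pyGet? cs ((0 : Int) + k + 1) = cs[k + 1]? := by
    rw [show (0 : Int) + k + 1 = ((k + 1 : Nat) : Int) by push_cast; ring,
      PySem.List.pyGet?_natCast]
  simp only [stepF, h1, h2, h3, h4]

lemma foldA_eq (cs : List Char) : ∀ (g : PySem.Dict Char Int),
    (PySem.List.pyRange 0 ((cs.length : Int) - 1) 1).foldl (stepF cs) g = auxA cs g := by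
  induction cs with
  | nil => intro g; rw [PySem.List.pyRange_one_eq_nil (by simp)]; rfl
  | cons a t ih =>
      intro g
      cases t with
      | nil => rw [PySem.List.pyRange_one_eq_nil (by simp)]; rfl
      | cons b r =>
          have hlen : ((a :: b :: r).length : Int) - 1 = ((b :: r).length : Int) := by
            simp
          rw [hlen, PySem.List.pyRange_one_cons (by exact_mod_cast Nat.succ_pos r.length),
            List.foldl_cons]
          have hstep : stepF (a :: b :: r) g 0
              = (if a = b then
                  (if g.contains a = false then g.insert a 0 else g).modify a 0 (· + 1)
                else g) := by
            have e1 : PySem.List.pyGet? (a :: b :: r) (0 : Int) = some a := by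
              rw [show (0 : Int) = ((0 : Nat) : Int) by norm_num, PySem.List.pyGet?_natCast]
              rfl
            have e2 : PySem.List.pyGet? (a :: b :: r) ((0 : Int) + 1) = some b := by
              rw [show (0 : Int) + 1 = ((1 : Nat) : Int) by norm_num, PySem.List.pyGet?_natCast]
              rfl
            simp only [stepF, e1, e2]
          rw [hstep]
          rw [show (0 : Int) + 1 = 1 by norm_num]
          rw [PySem.List.pyRange_one 1 ((b :: r).length : Int), List.foldl_map]
          have h2 := ih (if a = b then
                  (if g.contains a = false then g.insert a 0 else g).modify a 0 (· + 1)
                else g)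
          rw [PySem.List.pyRange_one 0 (((b :: r).length : Int) - 1), List.foldl_map] at h2
          simp only [sub_zero] at h2
          rw [show auxA (a :: b :: r) g = auxA (b :: r) (if a = b then
              (if g.contains a = false then g.insert a 0 else g).modify a 0 (· + 1)
            else g) from rfl, ← h2]
          apply List.foldl_ext
          intro acc x hx
          exact stepF_shift a (b :: r) acc x

lemma getD_foldl_ins (l : List (Char × Int)) (d : PySem.Dict Char Int) (c : Char) :
    (l.foldl (fun (d : PySem.Dict Char Int) p => d.insert p.1 (d.getD p.1 0 + p.2 - 1)) d).getD c 0
      = d.getD c 0 + ((l.filter (fun p => p.1 = c)).map (fun p => p.2 - 1)).sum := by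
  induction l generalizing d with
  | nil => simp
  | cons p t ih =>
      simp only [List.foldl_cons, ih, List.filter_cons]
      by_cases h : p.1 = c
      · simp [h]; ring
      · simp [h, PySem.Dict.getD_insert, Ne.symm h]

lemma foldl_or (l : List (Char × Int)) (b : Bool) :
    l.foldl (fun b kv => if kv.2 = 1 then true else b) b = (b || l.any (fun kv => kv.2 == 1)) := by
  induction l generalizing b with
  | nil => simp
  | cons p t ih =>
      rw [List.foldl_cons, ih]
      cases b <;> by_cases h : p.2 = 1 <;> simp [h]

lemma hA_char (s : String) : check_for_double_not_matching s
    = (auxA s.toList PySem.Dict.empty).items.foldl (fun b kv => if kv.2 = 1 then true else b) false := by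
  have hfun : (fun (g : PySem.Dict Char Int) (i : Int) =>
      match PySem.Str.pyGet? s i, PySem.Str.pyGet? s (i + 1) with
      | some char, some nxt =>
          if char = nxt then
            (if g.contains char = false then g.insert char 0 else g).modify char 0 (· + 1)
          else g
      | _, _ => g) = stepF s.toList := rfl
  have hlen : PySem.Str.len s - 1 = ((s.toList.length : Nat) : Int) - 1 := by simp [pysem]
  show ((PySem.List.pyRange 0 (PySem.Str.len s - 1) 1).foldl _ PySem.Dict.empty).items.foldl _ false = _
  rw [hlen, hfun, foldA_eq]

lemma hB_char (s : String) : check_for_double_not_matching_alt s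
    = ((rle s.toList).foldl
        (fun (d : PySem.Dict Char Int) p => d.insert p.1 (d.getD p.1 0 + p.2 - 1))
        PySem.Dict.empty).values.contains 1 := rfl


lemma main_eq (s : String) : check_for_double_not_matching s = check_for_double_not_matching_alt s := by
  rw [hA_char, hB_char, Bool.eq_iff_iff]
  have nodupA : (auxA s.toList PySem.Dict.empty).keys.Nodup :=
    auxA_nodup s.toList _ PySem.Dict.nodup_keys_empty
  have nodupB : ((rle s.toList).foldl
      (fun (d : PySem.Dict Char Int) p => d.insert p.1 (d.getD p.1 0 + p.2 - 1))
      PySem.Dict.empty).keys.Nodup :=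
    PySem.Dict.nodup_keys_foldl_insert_key _ Prod.fst _ _ PySem.Dict.nodup_keys_empty
  have hgetD : ∀ c : Char, ((rle s.toList).foldl
      (fun (d : PySem.Dict Char Int) p => d.insert p.1 (d.getD p.1 0 + p.2 - 1))
      PySem.Dict.empty).getD c 0 = ((pairChars s.toList).count c : Int) := by
    intro c
    rw [getD_foldl_ins, rle_count, PySem.Dict.getD_empty]
    ring
  have hkeysB : ∀ c : Char, c ∈ ((rle s.toList).foldl
      (fun (d : PySem.Dict Char Int) p => d.insert p.1 (d.getD p.1 0 + p.2 - 1))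
      PySem.Dict.empty).keys ↔ c ∈ s.toList := by
    intro c
    rw [PySem.Dict.keys_foldl_insert_key, PySem.Dict.keys_empty, PySem.Set.mem_update]
    simp only [List.not_mem_nil, false_or]
    exact mem_rle_fst s.toList c
  have hContains : ∀ (l : List Int), (l.contains (1 : Int) = true) ↔ (1 : Int) ∈ l := by
    intro l; simp
  constructor
  · intro hA
    rw [foldl_or, Bool.false_or, List.any_eq_true] at hA
    obtain ⟨kv, hmem, hv⟩ := hA
    rw [PySem.Dict.items_eq_map_keys _ nodupA 0] at hmem
    obtain ⟨k, hk, rfl⟩ := List.mem_map.mp hmem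
    have hval : (auxA s.toList PySem.Dict.empty).getD k 0 = 1 := by simpa using hv
    rw [auxA_getD, PySem.Dict.getD_empty] at hval
    have hcount : (pairChars s.toList).count k = 1 := by omega
    have hmemP : k ∈ pairChars s.toList := List.count_pos_iff.mp (by omega)
    have hmemcs : k ∈ s.toList := pairChars_subset hmemP
    rw [hContains, PySem.Dict.values_eq_map_keys _ nodupB 0]
    refine List.mem_map.mpr ⟨k, (hkeysB k).mpr hmemcs, ?_⟩
    rw [hgetD k, hcount]
    rfl
  · intro hB
    rw [hContains, PySem.Dict.values_eq_map_keys _ nodupB 0] at hB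
    obtain ⟨k, hk, hv⟩ := List.mem_map.mp hB
    rw [hgetD k] at hv
    have hcount : (pairChars s.toList).count k = 1 := by omega
    have hmemP : k ∈ pairChars s.toList := List.count_pos_iff.mp (by omega)
    rw [foldl_or, Bool.false_or, List.any_eq_true]
    refine ⟨(k, (auxA s.toList PySem.Dict.empty).getD k 0), ?_, ?_⟩
    · rw [PySem.Dict.items_eq_map_keys _ nodupA 0]
      refine List.mem_map.mpr ⟨k, ?_, rfl⟩
      rw [auxA_mem_keys]
      left
      exact hmemP
    · rw [auxA_getD, PySem.Dict.getD_empty]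
      simp [hcount]

-- ===== VERDICT (by name: the statement is the Claim_ definition above) =====
theorem check_for_double_not_matching_spec : Claim_equal_check_for_double_not_matching := by
  intro _in _
  unfold Spec_check_for_double_not_matching
  exact main_eq _in
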